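-- pv_equiv track=rewrite | github.com/MBradbury/iot-trust-task-alloc | tools/eckeygen.py | format_individual
-- ===== SOURCE A (Python) =====
-- from textwrap import wrap
--
-- def chunks(lst, n):
--     """Yield successive n-sized chunks from lst."""
--     for i in range(0, len(lst), n):
--         yield lst[i:i + n]
--
-- def format_individual(number, size, line_group_size=None):
--     hex_num = number.to_bytes(32, 'big').hex().upper()
--
--     wrapped = [f"0x{part}" for part in wrap(hex_num, size)]
--
--     if line_group_size is None:
--         return ", ".join(wrapped)
--     else:
--         chunked = list(chunks(wrapped, line_group_size))
--         return ",\n                  ".join([", ".join(chunk) for chunk in chunked])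
-- ===== SOURCE B (Python) =====
-- from textwrap import wrap
--
-- def format_individual(number, size, line_group_size=None):
--     hex_num = number.to_bytes(32, 'big').hex().upper()
--     out = []
--     count = 0
--     for part in wrap(hex_num, size):
--         if out:
--             if count == line_group_size:
--                 out.append(",\n                  ")
--                 count = 0
--             else:
--                 out.append(", ")
--         out.append("0x" + part)
--         count += 1
--     return "".join(out)
-- ===== Notes on version B (the rewrite author's own statement) =====
-- stated objective: simpler
-- what changed: Replaced the comprehension + generator-based chunking + nested double join with a single pass over the wrapped hex parts that emits each token and separator directly, using a counter reset at line_group_size to decide between ', ' and the newline separator.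
-- intended difference: For negative line_group_size A's range(0, len, n) with a negative step yields no chunks so A returns the empty string, dropping all the data; B's counter never reaches a negative threshold so B returns the whole ', '-joined token list on one line, which is the intended formatting. — e.g. on format_individual(1, 16, some (-1)): A returns "", B returns "0x0000000000000000, 0x0000000000000000, 0x0000000000000000, 0x0000000000000001"
import Mathlib
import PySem

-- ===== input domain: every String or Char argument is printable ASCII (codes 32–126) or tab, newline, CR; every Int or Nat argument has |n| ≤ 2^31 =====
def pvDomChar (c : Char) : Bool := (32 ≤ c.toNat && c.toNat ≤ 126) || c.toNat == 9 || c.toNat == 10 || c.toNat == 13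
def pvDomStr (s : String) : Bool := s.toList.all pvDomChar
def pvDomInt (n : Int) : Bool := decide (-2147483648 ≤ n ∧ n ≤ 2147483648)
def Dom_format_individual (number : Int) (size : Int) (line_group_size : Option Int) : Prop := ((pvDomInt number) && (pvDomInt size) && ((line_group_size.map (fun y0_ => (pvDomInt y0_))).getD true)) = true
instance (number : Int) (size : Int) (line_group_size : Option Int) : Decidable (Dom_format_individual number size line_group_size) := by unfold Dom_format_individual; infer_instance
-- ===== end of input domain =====

-- B replaces A's comprehension + generator chunking + nested double join by one pass over the
-- wrapped hex parts that emits each separator directly from a counter (objective: simpler).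


-- shared library-call helpers (used by both ports):
-- number.to_bytes(32,'big').hex().upper() — the 64 uppercase hex digits (exact for 0 ≤ number < 2^256)
def pvHexDigit (d : Int) : Char := (['0','1','2','3','4','5','6','7','8','9','A','B','C','D','E','F']).getD d.toNat '0'

def pvHex64 (n : Int) : List Char :=
  (List.range 64).map (fun j => pvHexDigit (PySem.Int.mod (PySem.Int.floordiv n (16 ^ (63 - j))) 16))

-- f"0x{part}"
def pvPref (part : List Char) : List Char := '0' :: 'x' :: part

-- textwrap.wrap on a whitespace-free string = successive chunks of n chars (exact on that domain);
-- fuel-structural recursion (fuel = initial length) so the kernel can evaluate it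
def pvWrapAux {α : Type} : Nat → List α → Nat → List (List α)
  | 0, _, _ => []
  | _ + 1, [], _ => []
  | fuel + 1, a :: rest, n => if n = 0 then [] else (a :: rest).take n :: pvWrapAux fuel ((a :: rest).drop n) n

def pvWrap {α : Type} (s : List α) (n : Nat) : List (List α) := pvWrapAux s.length s n

def pvSep1 : List Char := [',', ' ']
def pvSepNL : List Char := (",\n                  ").toList

-- ===== PORT A =====
-- chunks(lst, n): [lst[i:i+n] for i in range(0, len(lst), n)]
def pvChunksA (lst : List (List Char)) (n : Int) : List (List (List Char)) :=
  (PySem.List.pyRange 0 lst.length n).map (fun i => PySem.List.slice lst (some i) (some (i + n)))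

def format_individual (number : Int) (size : Int) (line_group_size : Option Int) : String :=
  let hex_num := pvHex64 number
  let wrapped := (pvWrap hex_num size.toNat).map pvPref
  match line_group_size with
  | none => String.ofList (PySem.Chars.join pvSep1 wrapped)
  | some g =>
      let chunked := pvChunksA wrapped g
      String.ofList (PySem.Chars.join pvSepNL (chunked.map (fun chunk => PySem.Chars.join pvSep1 chunk)))

-- ===== PORT B =====
-- one loop iteration of Source B: if out is nonempty append the separator (the newline one when count
-- hits line_group_size, resetting count to 0), then append the '0x' token, then count += 1
def pvAltStep (lgs : Option Int) (st : List (List Char) × Int) (part : List Char) : List (List Char) × Int :=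
  match st with
  | (out, count) =>
    if out.isEmpty then (out ++ [pvPref part], count + 1)
    else if some count = lgs then (out ++ [pvSepNL, pvPref part], 0 + 1)
    else (out ++ [pvSep1, pvPref part], count + 1)

def format_individual_alt (number : Int) (size : Int) (line_group_size : Option Int) : String :=
  let hex_num := pvHex64 number
  let st := (pvWrap hex_num size.toNat).foldl (pvAltStep line_group_size) ([], 0)
  String.ofList (PySem.Chars.join [] st.1)

-- ===== PRECONDITION & SPEC =====
-- exactly where the Python A returns: to_bytes needs 0 ≤ number (number < 2^256 follows from Dom),
-- textwrap.wrap needs a positive width, and chunks' range(..., 0) raises ValueError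
def Pre_format_individual (number : Int) (size : Int) (line_group_size : Option Int) : Prop :=
  0 ≤ number ∧ 1 ≤ size ∧ line_group_size ≠ some 0
instance (number : Int) (size : Int) (line_group_size : Option Int) : Decidable (Pre_format_individual number size line_group_size) := by unfold Pre_format_individual; infer_instance

def pvWitness_format_individual : Int × Int × Option Int := (1, 16, some 2)

-- For negative line_group_size A's range(0, len, n) with a negative step yields no chunks so A
-- returns "", dropping all the data; B's counter never reaches a negative threshold so B returns
-- the whole ", "-joined token list on one line, which is the intended formatting.
def D_format_individual (number : Int) (size : Int) (line_group_size : Option Int) : Prop :=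
  line_group_size.getD 0 < 0
instance (number : Int) (size : Int) (line_group_size : Option Int) : Decidable (D_format_individual number size line_group_size) := by unfold D_format_individual; infer_instance

def Spec_format_individual (number : Int) (size : Int) (line_group_size : Option Int) (out : String) : Prop := ¬ D_format_individual number size line_group_size → out = format_individual_alt number size line_group_size
instance (number : Int) (size : Int) (line_group_size : Option Int) (out : String) : Decidable (Spec_format_individual number size line_group_size out) := by unfold Spec_format_individual; infer_instance

def pvDiffWitness_format_individual : Int × Int × Option Int := (1, 16, some (-1))
def pvDiffWitnessOut_format_individual : String × String :=
  ("", "0x0000000000000000, 0x0000000000000000, 0x0000000000000000, 0x0000000000000001")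

-- ===== CLAIM (what is proved, stated in full; the proofs are below) =====
def Claim_unchanged_format_individual : Prop := ∀ (number : Int) (size : Int) (line_group_size : Option Int), Dom_format_individual number size line_group_size → Pre_format_individual number size line_group_size → Spec_format_individual number size line_group_size (format_individual number size line_group_size)
def Claim_changed_format_individual : Prop := Dom_format_individual (pvDiffWitness_format_individual.1) (pvDiffWitness_format_individual.2.1) (pvDiffWitness_format_individual.2.2) ∧ Pre_format_individual (pvDiffWitness_format_individual.1) (pvDiffWitness_format_individual.2.1) (pvDiffWitness_format_individual.2.2) ∧ D_format_individual (pvDiffWitness_format_individual.1) (pvDiffWitness_format_individual.2.1) (pvDiffWitness_format_individual.2.2) ∧ format_individual (pvDiffWitness_format_individual.1) (pvDiffWitness_format_individual.2.1) (pvDiffWitness_format_individual.2.2) = pvDiffWitnessOut_format_individual.1 ∧ format_individual_alt (pvDiffWitness_format_individual.1) (pvDiffWitness_format_individual.2.1) (pvDiffWitness_format_individual.2.2) = pvDiffWitnessOut_format_individual.2 ∧ pvDiffWitnessOut_format_individual.1 ≠ pvDiffWitnessOut_format_individual.2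
def Claim_exact_format_individual : Prop := ∀ (number : Int) (size : Int) (line_group_size : Option Int), Dom_format_individual number size line_group_size → Pre_format_individual number size line_group_size → D_format_individual number size line_group_size → format_individual number size line_group_size ≠ format_individual_alt number size line_group_size

-- ===== LEMMAS AND PROOFS =====

theorem ofList_eq (l : List Char) (s : String) (h : l = s.toList) : String.ofList l = s := by
  subst h; exact String.ofList_toList

-- pvWrap unfolding equations
theorem pvWrapAux_irrel {α : Type} : ∀ (f1 f2 : Nat) (s : List α) (n : Nat),
    s.length ≤ f1 → s.length ≤ f2 → pvWrapAux f1 s n = pvWrapAux f2 s n := by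
  intro f1
  induction f1 with
  | zero =>
    intro f2 s n h1 _
    have hs : s = [] := List.eq_nil_of_length_eq_zero (by omega)
    subst hs; cases f2 <;> rfl
  | succ f1 ih =>
    intro f2 s n h1 h2
    cases s with
    | nil => cases f2 <;> rfl
    | cons a rest =>
      cases f2 with
      | zero => simp at h2
      | succ f2 =>
        simp only [pvWrapAux]
        by_cases hn : n = 0
        · simp [hn]
        · rw [if_neg hn, if_neg hn]
          have hd : ((a :: rest).drop n).length ≤ f1 := by
            simp only [List.length_drop, List.length_cons]
            simp only [List.length_cons] at h1; omega
          have hd2 : ((a :: rest).drop n).length ≤ f2 := by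
            simp only [List.length_drop, List.length_cons]
            simp only [List.length_cons] at h2; omega
          rw [ih f2 _ n hd hd2]

theorem pvWrap_nil {α : Type} (n : Nat) : pvWrap ([] : List α) n = [] := rfl

theorem pvWrap_cons {α : Type} (a : α) (rest : List α) (n : Nat) (hn : n ≠ 0) :
    pvWrap (a :: rest) n = (a :: rest).take n :: pvWrap ((a :: rest).drop n) n := by
  show pvWrapAux (a :: rest).length (a :: rest) n = _
  simp only [List.length_cons, pvWrapAux, if_neg hn]
  congr 1
  exact pvWrapAux_irrel _ _ _ _ (by simp only [List.length_drop]; simp; omega) (le_refl _)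

-- flattening join with the empty separator
theorem jflat_cons (a : List Char) (rest : List (List Char)) :
    PySem.Chars.join [] (a :: rest) = a ++ PySem.Chars.join [] rest := by
  cases rest with
  | nil => simp [PySem.Chars.join_singleton, PySem.Chars.join_nil]
  | cons b bs => simp [PySem.Chars.join_cons_cons]

-- ", ".join(map pref l) written as a flat concatenation
theorem joinFlat (p : List Char) (xs : List (List Char)) :
    PySem.Chars.join pvSep1 (pvPref p :: xs.map pvPref)
      = pvPref p ++ xs.flatMap (fun q => pvSep1 ++ pvPref q) := by
  induction xs generalizing p with
  | nil => simp [PySem.Chars.join_singleton]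
  | cons q qs ih => simp [PySem.Chars.join_cons_cons, ih q, List.append_assoc]

-- the pieces B's loop appends after the first token
def pvTail (lgs : Option Int) (c : Int) : List (List Char) → List (List Char)
  | [] => []
  | p :: ps =>
    if some c = lgs then pvSepNL :: pvPref p :: pvTail lgs 1 ps
    else pvSep1 :: pvPref p :: pvTail lgs (c + 1) ps

theorem pvTail_cons_eq (g c : Int) (p : List Char) (ps : List (List Char)) (h : c = g) :
    pvTail (some g) c (p :: ps) = pvSepNL :: pvPref p :: pvTail (some g) 1 ps := by
  simp [pvTail, h]

theorem pvTail_cons_ne (lgs : Option Int) (c : Int) (p : List Char) (ps : List (List Char))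
    (h : some c ≠ lgs) : pvTail lgs c (p :: ps) = pvSep1 :: pvPref p :: pvTail lgs (c + 1) ps := by
  simp [pvTail, h]

theorem foldAlt_ne_nil (lgs : Option Int) :
    ∀ (ps : List (List Char)) (out : List (List Char)) (c : Int), out ≠ [] →
      (ps.foldl (pvAltStep lgs) (out, c)).1 = out ++ pvTail lgs c ps := by
  intro ps
  induction ps with
  | nil => intro out c _; simp [pvTail]
  | cons p ps ih =>
    intro out c hout
    have hne : out.isEmpty = false := by simpa [List.isEmpty_iff] using hout
    simp only [List.foldl_cons, pvAltStep, hne, Bool.false_eq_true, if_false]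
    by_cases hc : some c = lgs
    · rw [if_pos hc, ih _ _ (by simp)]
      rcases lgs with _ | g
      · exact absurd hc (by simp)
      · rw [pvTail_cons_eq g c p ps (by simpa using hc)]
        simp [List.append_assoc]
    · rw [if_neg hc, ih _ _ (by simp)]
      rw [pvTail_cons_ne lgs c p ps hc]
      simp [List.append_assoc]

theorem foldAlt0 (lgs : Option Int) (p : List Char) (ps : List (List Char)) :
    ((p :: ps).foldl (pvAltStep lgs) (([] : List (List Char)), (0 : Int))).1
      = pvPref p :: pvTail lgs 1 ps := by
  have h : pvAltStep lgs ([], 0) p = ([pvPref p], 1) := by simp [pvAltStep]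
  rw [List.foldl_cons, h, foldAlt_ne_nil lgs ps [pvPref p] 1 (by simp)]
  simp

-- with line_group_size = None the separator is always ", "
theorem tailNone : ∀ (ps : List (List Char)) (c : Int),
    PySem.Chars.join [] (pvTail none c ps) = ps.flatMap (fun q => pvSep1 ++ pvPref q) := by
  intro ps
  induction ps with
  | nil => intro c; simp [pvTail, PySem.Chars.join_nil]
  | cons q qs ih =>
    intro c
    rw [pvTail_cons_ne none c q qs (by simp)]
    rw [jflat_cons, jflat_cons, ih (c + 1)]
    simp [List.append_assoc]

-- peeling the current line group off B's tail (1 ≤ c ≤ g)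
def pvRest (g : Int) : List (List Char) → List Char
  | [] => []
  | q :: qs => pvSepNL ++ pvPref q ++ PySem.Chars.join [] (pvTail (some g) 1 qs)

theorem tailPeel (g : Int) : ∀ (ps : List (List Char)) (c : Int), 1 ≤ c → c ≤ g →
    PySem.Chars.join [] (pvTail (some g) c ps)
      = (ps.take (g - c).toNat).flatMap (fun q => pvSep1 ++ pvPref q)
        ++ pvRest g (ps.drop (g - c).toNat) := by
  intro ps
  induction ps with
  | nil => intro c _ _; simp [pvTail, pvRest, PySem.Chars.join_nil]
  | cons q qs ih =>
    intro c h1 h2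
    by_cases hc : c = g
    · have h0 : (g - c).toNat = 0 := by omega
      subst hc
      rw [pvTail_cons_eq c c q qs rfl]
      simp only [h0, List.take_zero, List.drop_zero, List.flatMap_nil, List.nil_append, pvRest]
      rw [jflat_cons, jflat_cons]
      simp [List.append_assoc]
    · have hlt : c < g := lt_of_le_of_ne h2 hc
      have hk : (g - c).toNat = (g - (c + 1)).toNat + 1 := by omega
      have hne : (some c : Option Int) ≠ some g := by simpa using hc
      rw [pvTail_cons_ne (some g) c q qs hne]
      rw [jflat_cons, jflat_cons, ih (c + 1) (by omega) (by omega)]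
      rw [hk]
      simp only [List.take_succ_cons, List.drop_succ_cons]
      simp [List.append_assoc]

-- B's flat output for one leading token equals A's chunked double join (positive group size)
theorem joinSome (g : Int) (hg : 1 ≤ g) :
    ∀ (N : Nat) (ps : List (List Char)), ps.length ≤ N → ∀ (p : List Char),
      PySem.Chars.join pvSepNL
          ((pvWrap (pvPref p :: ps.map pvPref) g.toNat).map (fun chunk => PySem.Chars.join pvSep1 chunk))
        = pvPref p ++ PySem.Chars.join [] (pvTail (some g) 1 ps) := by
  intro N
  induction N with
  | zero =>
    intro ps hps p
    have hnil : ps = [] := List.eq_nil_of_length_eq_zero (by omega)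
    subst hnil
    have hgn : g.toNat ≠ 0 := by omega
    rw [pvWrap_cons _ _ _ hgn]
    have htake : ([pvPref p] : List (List Char)).take g.toNat = [pvPref p] :=
      List.take_of_length_le (by simp; omega)
    have hdropn : ([pvPref p] : List (List Char)).drop g.toNat = [] :=
      List.drop_eq_nil_of_le (by simp; omega)
    simp [htake, hdropn, pvWrap_nil, pvTail, PySem.Chars.join_nil, PySem.Chars.join_singleton]
  | succ N ih =>
    intro ps hps p
    have hgn : g.toNat ≠ 0 := by omega
    obtain ⟨k, hk⟩ : ∃ k, g.toNat = k + 1 := ⟨g.toNat - 1, by omega⟩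
    have hg1 : (g - 1).toNat = k := by omega
    rw [pvWrap_cons _ _ _ hgn]
    rw [hk]
    simp only [List.take_succ_cons, List.drop_succ_cons, ← List.map_take, ← List.map_drop]
    rcases hdrop : ps.drop k with _ | ⟨q, qs⟩
    · -- everything fits on the (single remaining) line
      have hfit : ps.length ≤ k := by
        have := congrArg List.length hdrop; simp at this; omega
      simp only [List.map_nil, pvWrap_nil, List.map_cons, List.map_nil,
        PySem.Chars.join_singleton]
      rw [List.take_of_length_le hfit, joinFlat]
      rw [tailPeel g ps 1 (by omega) hg, hg1, List.take_of_length_le hfit,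
        List.drop_eq_nil_of_le hfit]
      simp [pvRest]
    · -- a full line of k+1 tokens, then recurse on the rest
      have hklen : k ≤ ps.length := by
        by_contra h
        rw [List.drop_eq_nil_of_le (by omega)] at hdrop
        exact absurd hdrop (by simp)
      have hlen : ps.length = k + (q :: qs).length := by
        have := congrArg List.length hdrop; simp at this; simp; omega
      have hqs : qs.length ≤ N := by simp at hlen; omega
      have ihq := ih qs hqs q
      simp only [List.map_cons]

      rw [show k + 1 = g.toNat from hk.symm]
      rcases hw : pvWrap (pvPref q :: qs.map pvPref) g.toNat with _ | ⟨w0, ws⟩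
      · rw [pvWrap_cons _ _ _ hgn] at hw; exact absurd hw (by simp)
      rw [hw] at ihq
      simp only [List.map_cons] at ihq
      rw [List.map_cons, PySem.Chars.join_cons_cons]
      rw [joinFlat, ihq]
      rw [tailPeel g ps 1 (by omega) hg, hg1, hdrop]
      simp [pvRest, List.append_assoc]

-- shifting a g-sized slice by g is slicing the dropped list
theorem sliceShift (g : Int) (hg : 1 ≤ g) (lst : List (List Char)) (k : Nat) :
    PySem.List.slice lst (some (g * (k + 1))) (some (g * (k + 1) + g))
      = PySem.List.slice (lst.drop g.toNat) (some (g * k)) (some (g * k + g)) := by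
  have h0 : (0 : Int) ≤ g * k := by positivity
  have hmul : g * ((k : Int) + 1) = g * k + g := by ring
  have e1 : (g * ((k : Int) + 1)).toNat = (g * k).toNat + g.toNat := by rw [hmul]; omega
  have e2 : (g * ((k : Int) + 1) + g).toNat - (g * ((k : Int) + 1)).toNat = g.toNat := by
    rw [hmul]; omega
  have e3 : (g * (k : Int) + g).toNat - (g * (k : Int)).toNat = g.toNat := by omega
  rw [PySem.List.slice_toNat, PySem.List.slice_toNat, List.drop_drop, e2, e3, e1,
    Nat.add_comm (g * (k : Int)).toNat g.toNat]
  all_goals (try rw [hmul])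
  all_goals omega

-- number of chunks of a nonempty list
def pvCnt (g : Int) (lst : List (List Char)) : Nat :=
  if lst = [] then 0 else (((lst.length : Int) - 1) / g).toNat + 1

theorem pyRange_cnt (g : Int) (hg : 1 ≤ g) (lst : List (List Char)) :
    PySem.List.pyRange 0 lst.length g
      = (List.range (pvCnt g lst)).map (fun k : Nat => g * (k : Int)) := by
  rw [PySem.List.pyRange_of_pos _ _ (by omega : (0 : Int) < g)]
  rcases lst with _ | ⟨a, rest⟩
  · simp [pvCnt]
  · have hL : (0 : Int) < ((a :: rest).length : Int) := by simp
    rw [if_pos (by omega)]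
    have h1 : ((a :: rest).length : Int) - 0 + g - 1 = (((a :: rest).length : Int) - 1) + 1 * g := by
      ring
    rw [h1, Int.add_mul_ediv_right _ _ (by omega : g ≠ 0)]
    have h2 : 0 ≤ (((a :: rest).length : Int) - 1) / g := Int.ediv_nonneg (by omega) (by omega)
    have h3 : ((((a :: rest).length : Int) - 1) / g + 1).toNat
        = ((((a :: rest).length : Int) - 1) / g).toNat + 1 := by omega
    rw [h3]
    have h4 : pvCnt g (a :: rest) = ((((a :: rest).length : Int) - 1) / g).toNat + 1 := by
      simp [pvCnt]
    rw [h4]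
    simp only [zero_add]

-- A's pyRange/slice chunking is take/drop chunking
theorem chunksA_eq_wrap (g : Int) (hg : 1 ≤ g) :
    ∀ (N : Nat) (lst : List (List Char)), lst.length ≤ N →
      pvChunksA lst g = pvWrap lst g.toNat := by
  intro N
  induction N with
  | zero =>
    intro lst hl
    have hnil : lst = [] := by cases lst <;> simp_all
    subst hnil
    have h0 : PySem.List.pyRange 0 (0 : Int) g = [] := by
      rw [PySem.List.pyRange_of_pos _ _ (by omega : (0 : Int) < g)]
      simp
    simp [pvChunksA, pvWrap_nil, h0]
  | succ N ih =>
    intro lst hl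
    rcases lst with _ | ⟨a, rest⟩
    · have h0 : PySem.List.pyRange 0 (0 : Int) g = [] := by
        rw [PySem.List.pyRange_of_pos _ _ (by omega : (0 : Int) < g)]
        simp
      simp [pvChunksA, pvWrap_nil, h0]
    · have hgn : g.toNat ≠ 0 := by omega
      unfold pvChunksA
      rw [pyRange_cnt g hg]
      have hcnt : pvCnt g (a :: rest) = (((( (a :: rest).length : Int)) - 1) / g).toNat + 1 := by
        simp [pvCnt]
      rw [hcnt, List.range_succ_eq_map]
      simp only [List.map_cons, List.map_map]
      rw [pvWrap_cons _ _ _ hgn]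
      congr 1
      · -- first chunk is take
        show PySem.List.slice (a :: rest) (some (g * ((0 : Nat) : Int))) (some (g * ((0 : Nat) : Int) + g)) = _
        have e : g * ((0 : Nat) : Int) = 0 := by simp
        rw [e, PySem.List.slice_toNat]
        · simp
        all_goals omega
      · -- remaining chunks chunk the dropped list
        have hdN : ((a :: rest).drop g.toNat).length ≤ N := by
          simp only [List.length_drop, List.length_cons]
          simp only [List.length_cons] at hl
          omega
        rw [← ih _ hdN]
        unfold pvChunksA
        rw [pyRange_cnt g hg, List.map_map]
        have hshift : ∀ k : Nat,
            PySem.List.slice (a :: rest) (some (g * ((k + 1 : Nat) : Int))) (some (g * ((k + 1 : Nat) : Int) + g))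
              = PySem.List.slice ((a :: rest).drop g.toNat) (some (g * (k : Int))) (some (g * (k : Int) + g)) := by
          intro k
          have := sliceShift g hg (a :: rest) k
          simpa using this
        have hcnt2 : ((((a :: rest).length : Int) - 1) / g).toNat = pvCnt g ((a :: rest).drop g.toNat) := by
          rcases hdrop : (a :: rest).drop g.toNat with _ | ⟨b, brest⟩
          · have hba : (a :: rest).length ≤ g.toNat := by
              have := congrArg List.length hdrop
              simp only [List.length_drop, List.length_nil] at this
              omega
            have hz2 : ((rest.length : Int)) / g = 0 := by
              have h1 : rest.length + 1 ≤ g.toNat := by simpa using hba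
              exact Int.ediv_eq_zero_of_lt (by omega) (by omega)
            simp [pvCnt, hz2]
          · have hgl : g.toNat < (a :: rest).length := by
              by_contra hcon
              rw [List.drop_eq_nil_of_le (by omega)] at hdrop
              exact absurd hdrop (by simp)
            simp only [pvCnt, if_neg (by simp : ¬ ((b :: brest : List (List Char)) = []))]
            rw [← hdrop]
            have hlen : (((a :: rest).drop g.toNat).length : Int) = ((a :: rest).length : Int) - g := by
              simp only [List.length_drop]
              omega
            rw [hlen]
            have e : ((a :: rest).length : Int) - 1 = (((a :: rest).length : Int) - g - 1) + 1 * g := by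
              ring
            rw [e, Int.add_mul_ediv_right _ _ (by omega : g ≠ 0)]
            have h2 : 0 ≤ (((a :: rest).length : Int) - g - 1) / g :=
              Int.ediv_nonneg (by omega) (by omega)
            omega
        rw [hcnt2]
        apply List.map_congr_left
        intro k _
        simpa using hshift k

-- range(0, L, g) is empty for negative g and 0 ≤ L
theorem pyRange_neg_nil (g L : Int) (hg : g < 0) (hL : 0 ≤ L) :
    PySem.List.pyRange 0 L g = [] := by
  simp only [PySem.List.pyRange, if_neg (by omega : ¬ g = 0)]
  rw [if_neg (by omega), if_neg (by omega)]
  simp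

theorem hex64_ne_nil (n : Int) : pvHex64 n ≠ [] := by
  simp [pvHex64, List.range_succ]

-- ===== VERDICT (by name: the statement is the Claim_ definition above) =====
theorem format_individual_spec : Claim_unchanged_format_individual := by
  intro number size lgs hdom hpre
  unfold Spec_format_individual
  intro hnd
  obtain ⟨hn0, hs1, hlgs⟩ := hpre
  unfold format_individual format_individual_alt
  cases lgs with
  | none =>
    simp only []
    congr 1
    rcases hw : pvWrap (pvHex64 number) size.toNat with _ | ⟨p, ps⟩
    · simp [PySem.Chars.join_nil]
    · rw [foldAlt0, jflat_cons, tailNone, List.map_cons, joinFlat]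
  | some g =>
    have hg0 : ¬ g < 0 := by simpa [D_format_individual] using hnd
    have hgne : g ≠ 0 := fun h => hlgs (by rw [h])
    have hg : 1 ≤ g := by omega
    simp only []
    congr 1
    rw [chunksA_eq_wrap g hg _ _ (le_refl _)]
    rcases hw : pvWrap (pvHex64 number) size.toNat with _ | ⟨p, ps⟩
    · simp [pvWrap_nil, PySem.Chars.join_nil]
    · rw [List.map_cons, joinSome g hg ps.length ps (le_refl _) p, foldAlt0, jflat_cons]

theorem format_individual_changed : Claim_changed_format_individual := by
  unfold Claim_changed_format_individual
  refine ⟨by decide, by decide, by decide, ?_, ?_, by decide⟩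
  · exact ofList_eq _ _ (by decide)
  · exact ofList_eq _ _ (by decide)

theorem format_individual_tight : Claim_exact_format_individual := by
  intro number size lgs hdom hpre hD
  obtain ⟨hn0, hs1, hlgs⟩ := hpre
  cases lgs with
  | none => simp [D_format_individual] at hD
  | some g =>
    have hgneg : g < 0 := by simpa [D_format_individual] using hD
    unfold format_individual format_individual_alt
    simp only []
    have hsz : size.toNat ≠ 0 := by omega
    rcases hhex : pvHex64 number with _ | ⟨a, rest⟩
    · exact absurd hhex (hex64_ne_nil number)
    rw [pvWrap_cons _ _ _ hsz, foldAlt0, jflat_cons]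
    unfold pvChunksA
    rw [pyRange_neg_nil g _ hgneg (by positivity)]
    simp only [List.map_nil, PySem.Chars.join_nil]
    intro heq
    rw [String.ofList_inj] at heq
    exact absurd heq.symm (by simp [pvPref])
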